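-- pv_equiv track=rewrite | github.com/hgb-bin-proteomics/MSAnnika_NC_Results | Lenz/eval/fn.py | is_fp
-- ===== SOURCE A (Python) =====
-- def is_fp(a, b, interactions):
--     for p1 in a:
--         for p2 in b:
--             if p2 in interactions and p1 in interactions[p2]:
--                 return False
--             if p1 in interactions and p2 in interactions[p1]:
--                 return False
--     return True
-- ===== SOURCE B (Python) =====
-- def is_fp(a, b, interactions):
--     sa = set(a)
--     sb = set(b)
--     for key, neigh in interactions.items():
--         in_a = key in sa
--         in_b = key in sb
--         if in_a or in_b:
--             ns = set(neigh)
--             if in_a and not ns.isdisjoint(sb):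
--                 return False
--             if in_b and not ns.isdisjoint(sa):
--                 return False
--     return True
-- ===== Notes on version B (the rewrite author's own statement) =====
-- stated objective: alternative
-- what changed: Replaces A's double loop over all pairs of a and b (one dict lookup per pair) by a single pass over the interaction dict's entries, testing each key and its neighbor set against precomputed set(a)/set(b); Pre_ only excludes association lists with duplicate keys, which cannot arise from a Python dict.
import Mathlib
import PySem

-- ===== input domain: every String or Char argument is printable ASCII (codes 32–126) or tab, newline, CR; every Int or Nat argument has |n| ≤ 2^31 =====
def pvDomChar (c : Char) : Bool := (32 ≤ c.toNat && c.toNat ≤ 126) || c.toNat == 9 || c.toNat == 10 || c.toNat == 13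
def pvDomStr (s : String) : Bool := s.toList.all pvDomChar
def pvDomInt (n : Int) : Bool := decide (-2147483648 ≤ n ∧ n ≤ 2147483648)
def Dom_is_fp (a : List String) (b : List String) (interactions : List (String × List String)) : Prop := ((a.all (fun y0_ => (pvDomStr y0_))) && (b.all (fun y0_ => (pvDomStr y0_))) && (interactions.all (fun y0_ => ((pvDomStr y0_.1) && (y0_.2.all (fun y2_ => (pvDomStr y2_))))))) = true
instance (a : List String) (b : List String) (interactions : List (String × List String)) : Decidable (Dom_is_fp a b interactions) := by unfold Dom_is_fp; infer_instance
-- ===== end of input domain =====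

-- B replaces A's double loop over all pairs of a and b by a single pass over the
-- interaction dict's entries with set membership against set(a)/set(b): an
-- alternative traversal (the Boolean result is order-independent).

-- ===== PORT A =====
-- inner 'for p2 in b' loop; returning false = Python's 'return False' from the whole function
-- 'k in interactions and v in interactions[k]' is the match on the first-match lookup
def isFpInnerA (p1 : String) (interactions : List (String × List String)) : List String → Bool
  | [] => true
  | p2 :: rest =>
    if (match interactions.lookup p2 with | some ns => decide (p1 ∈ ns) | none => false) then false
    else if (match interactions.lookup p1 with | some ns => decide (p2 ∈ ns) | none => false) then false
    else isFpInnerA p1 interactions rest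

-- outer 'for p1 in a' loop
def isFpOuterA (b : List String) (interactions : List (String × List String)) : List String → Bool
  | [] => true
  | p1 :: rest =>
    if isFpInnerA p1 interactions b then isFpOuterA b interactions rest else false

def is_fp (a : List String) (b : List String) (interactions : List (String × List String)) : Bool :=
  isFpOuterA b interactions a

-- ===== PORT B =====
-- single pass over the dict's entries, membership against set(a)/set(b)
def isFpScanB (sa sb : PySem.Set String) : List (String × List String) → Bool
  | [] => true
  | (key, neigh) :: rest =>
    let inA := PySem.Set.contains sa key
    let inB := PySem.Set.contains sb key
    if inA || inB then
      let ns := PySem.Set.ofList neigh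
      if inA && !(PySem.Set.isdisjoint ns sb) then false
      else if inB && !(PySem.Set.isdisjoint ns sa) then false
      else isFpScanB sa sb rest
    else isFpScanB sa sb rest

def is_fp_alt (a : List String) (b : List String) (interactions : List (String × List String)) : Bool :=
  isFpScanB (PySem.Set.ofList a) (PySem.Set.ofList b) interactions

-- ===== PRECONDITION & SPEC =====
-- Pre_ excludes only association lists with duplicate keys: a Python dict cannot have
-- duplicate keys, so every input reaching the Python programs satisfies Pre_.
def Pre_is_fp (a : List String) (b : List String) (interactions : List (String × List String)) : Prop :=
  (interactions.map Prod.fst).Nodup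
instance (a : List String) (b : List String) (interactions : List (String × List String)) : Decidable (Pre_is_fp a b interactions) := by unfold Pre_is_fp; infer_instance

def pvWitness_is_fp : List String × List String × (List (String × List String)) :=
  (["x"], ["y"], [("x", ["y"])])

def Spec_is_fp (a : List String) (b : List String) (interactions : List (String × List String)) (out : Bool) : Prop := out = is_fp_alt a b interactions
instance (a : List String) (b : List String) (interactions : List (String × List String)) (out : Bool) : Decidable (Spec_is_fp a b interactions out) := by unfold Spec_is_fp; infer_instance

-- ===== CLAIM (what is proved, stated in full; the proofs are below) =====
def Claim_equal_is_fp : Prop := ∀ (a : List String) (b : List String) (interactions : List (String × List String)), Dom_is_fp a b interactions → Pre_is_fp a b interactions → Spec_is_fp a b interactions (is_fp a b interactions)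

-- ===== LEMMAS AND PROOFS =====

-- 'x interacts with y' read off one dict entry
def HitP (a b : List String) (p : String × List String) : Prop :=
  (p.1 ∈ a ∧ ∃ x ∈ p.2, x ∈ b) ∨ (p.1 ∈ b ∧ ∃ x ∈ p.2, x ∈ a)

-- A's pair condition, via first-match lookup
def HitA (interactions : List (String × List String)) (p1 p2 : String) : Prop :=
  (∃ ns, interactions.lookup p2 = some ns ∧ p1 ∈ ns) ∨
  (∃ ns, interactions.lookup p1 = some ns ∧ p2 ∈ ns)

theorem matchHit_true_iff (interactions : List (String × List String)) (x y : String) :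
    (match interactions.lookup x with | some ns => decide (y ∈ ns) | none => false) = true ↔
    ∃ ns, interactions.lookup x = some ns ∧ y ∈ ns := by
  cases hl : interactions.lookup x <;> simp [hl]

theorem lookup_some_mem {l : List (String × List String)} {x : String} {ns : List String}
    (h : List.lookup x l = some ns) : (x, ns) ∈ l := by
  induction l with
  | nil => simp [List.lookup] at h
  | cons p rest ih =>
    obtain ⟨k, v⟩ := p
    rw [List.lookup] at h
    by_cases hx : (x == k) = true
    · simp [hx] at h
      exact List.mem_cons.mpr (Or.inl (by rw [Prod.mk.injEq]; exact ⟨beq_iff_eq.mp hx, h.symm⟩))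
    · rw [Bool.not_eq_true] at hx
      simp [hx] at h
      exact List.mem_cons_of_mem _ (ih h)

theorem mem_lookup_of_nodup {l : List (String × List String)} {x : String} {ns : List String}
    (hk : (l.map Prod.fst).Nodup) (h : (x, ns) ∈ l) : List.lookup x l = some ns := by
  induction l with
  | nil => simp at h
  | cons p rest ih =>
    obtain ⟨k, v⟩ := p
    rw [List.map_cons, List.nodup_cons] at hk
    rcases List.mem_cons.mp h with h | h
    · rw [← h]; simp [List.lookup]
    · have hne : (x == k) = false := by
        refine beq_eq_false_iff_ne.mpr (fun he => hk.1 ?_)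
        have hx : x ∈ rest.map Prod.fst := List.mem_map_of_mem h
        exact he ▸ hx
      rw [List.lookup, hne]
      exact ih hk.2 h

theorem innerA_true_iff (p1 : String) (interactions : List (String × List String)) (b : List String) :
    isFpInnerA p1 interactions b = true ↔ ∀ p2 ∈ b, ¬ HitA interactions p1 p2 := by
  induction b with
  | nil => simp [isFpInnerA]
  | cons p2 rest ih =>
    rw [isFpInnerA]
    by_cases h1 : (match interactions.lookup p2 with | some ns => decide (p1 ∈ ns) | none => false) = true
    · rw [if_pos h1]
      simp only [Bool.false_eq_true, false_iff]
      intro hall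
      exact hall p2 (by simp) (Or.inl ((matchHit_true_iff interactions p2 p1).mp h1))
    · rw [if_neg h1]
      by_cases h2 : (match interactions.lookup p1 with | some ns => decide (p2 ∈ ns) | none => false) = true
      · rw [if_pos h2]
        simp only [Bool.false_eq_true, false_iff]
        intro hall
        exact hall p2 (by simp) (Or.inr ((matchHit_true_iff interactions p1 p2).mp h2))
      · rw [if_neg h2, ih]
        constructor
        · intro h q hq
          rcases List.mem_cons.mp hq with rfl | hq
          · rintro (hh | hh)
            · exact h1 ((matchHit_true_iff interactions q p1).mpr hh)
            · exact h2 ((matchHit_true_iff interactions p1 q).mpr hh)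
          · exact h q hq
        · intro h q hq; exact h q (List.mem_cons_of_mem _ hq)

theorem outerA_true_iff (a b : List String) (interactions : List (String × List String)) :
    isFpOuterA b interactions a = true ↔ ∀ p1 ∈ a, ∀ p2 ∈ b, ¬ HitA interactions p1 p2 := by
  induction a with
  | nil => simp [isFpOuterA]
  | cons p1 rest ih =>
    rw [isFpOuterA]
    by_cases h : isFpInnerA p1 interactions b = true
    · rw [if_pos h, ih]
      rw [innerA_true_iff] at h
      simp only [List.forall_mem_cons]
      exact ⟨fun hr => ⟨h, hr⟩, fun hr => hr.2⟩
    · rw [if_neg h]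
      simp only [Bool.false_eq_true, false_iff]
      intro hall
      exact h ((innerA_true_iff _ _ _).mpr (fun q hq => hall p1 (by simp) q hq))

theorem scanB_true_iff (a b : List String) (l : List (String × List String)) :
    isFpScanB (PySem.Set.ofList a) (PySem.Set.ofList b) l = true ↔ ∀ p ∈ l, ¬ HitP a b p := by
  induction l with
  | nil => simp [isFpScanB]
  | cons p rest ih =>
    obtain ⟨key, neigh⟩ := p
    have hinA : (PySem.Set.contains (PySem.Set.ofList a) key = true) ↔ key ∈ a := by
      simp [PySem.Set.mem_ofList]
    have hinB : (PySem.Set.contains (PySem.Set.ofList b) key = true) ↔ key ∈ b := by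
      simp [PySem.Set.mem_ofList]
    have hdisB : (PySem.Set.isdisjoint (PySem.Set.ofList neigh) (PySem.Set.ofList b) = true) ↔ ∀ x ∈ neigh, x ∉ b := by
      simp [PySem.Set.isdisjoint_iff]
    have hdisA : (PySem.Set.isdisjoint (PySem.Set.ofList neigh) (PySem.Set.ofList a) = true) ↔ ∀ x ∈ neigh, x ∉ a := by
      simp [PySem.Set.isdisjoint_iff]
    have hHit : HitP a b (key, neigh) ↔
        ((key ∈ a ∧ ¬ ∀ x ∈ neigh, x ∉ b) ∨ (key ∈ b ∧ ¬ ∀ x ∈ neigh, x ∉ a)) := by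
      unfold HitP
      constructor
      · rintro (⟨h1, x, hx, hb2⟩ | ⟨h1, x, hx, hb2⟩)
        · exact Or.inl ⟨h1, fun hc => hc x hx hb2⟩
        · exact Or.inr ⟨h1, fun hc => hc x hx hb2⟩
      · rintro (⟨h1, h2⟩ | ⟨h1, h2⟩)
        · push Not at h2; obtain ⟨x, hx, hb2⟩ := h2; exact Or.inl ⟨h1, x, hx, hb2⟩
        · push Not at h2; obtain ⟨x, hx, hb2⟩ := h2; exact Or.inr ⟨h1, x, hx, hb2⟩
    show (if _ then (if _ then false else if _ then false else isFpScanB _ _ rest)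
          else isFpScanB _ _ rest) = true ↔ _
    by_cases hor : (PySem.Set.contains (PySem.Set.ofList a) key || PySem.Set.contains (PySem.Set.ofList b) key) = true
    · rw [if_pos hor]
      by_cases hfst : (PySem.Set.contains (PySem.Set.ofList a) key && !(PySem.Set.isdisjoint (PySem.Set.ofList neigh) (PySem.Set.ofList b))) = true
      · rw [if_pos hfst]
        simp only [Bool.false_eq_true, false_iff]
        intro hall
        apply hall (key, neigh) (by simp)
        rw [hHit]
        simp only [Bool.and_eq_true_iff] at hfst
        refine Or.inl ⟨hinA.mp hfst.1, fun hc => ?_⟩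
        have hcd := hdisB.mpr hc
        simp [hcd] at hfst
      · rw [if_neg hfst]
        by_cases hsnd : (PySem.Set.contains (PySem.Set.ofList b) key && !(PySem.Set.isdisjoint (PySem.Set.ofList neigh) (PySem.Set.ofList a))) = true
        · rw [if_pos hsnd]
          simp only [Bool.false_eq_true, false_iff]
          intro hall
          apply hall (key, neigh) (by simp)
          rw [hHit]
          simp only [Bool.and_eq_true_iff] at hsnd
          refine Or.inr ⟨hinB.mp hsnd.1, fun hc => ?_⟩
          have hcd := hdisA.mpr hc
          simp [hcd] at hsnd
        · rw [if_neg hsnd, ih]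
          constructor
          · intro h q hq
            rcases List.mem_cons.mp hq with rfl | hq
            · rw [hHit]
              rintro (⟨ha, hnb⟩ | ⟨hb, hna⟩)
              · apply hfst
                simp only [Bool.and_eq_true_iff]
                refine ⟨hinA.mpr ha, ?_⟩
                cases hd : PySem.Set.isdisjoint (PySem.Set.ofList neigh) (PySem.Set.ofList b)
                · rfl
                · exact absurd (hdisB.mp hd) hnb
              · apply hsnd
                simp only [Bool.and_eq_true_iff]
                refine ⟨hinB.mpr hb, ?_⟩
                cases hd : PySem.Set.isdisjoint (PySem.Set.ofList neigh) (PySem.Set.ofList a)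
                · rfl
                · exact absurd (hdisA.mp hd) hna
            · exact h q hq
          · intro h q hq; exact h q (List.mem_cons_of_mem _ hq)
    · rw [if_neg hor, ih]
      constructor
      · intro h q hq
        rcases List.mem_cons.mp hq with rfl | hq
        · rw [hHit]
          rintro (⟨ha, _⟩ | ⟨hb, _⟩)
          · exact hor (by simp [ha])
          · exact hor (by simp [hb])
        · exact h q hq
      · intro h q hq; exact h q (List.mem_cons_of_mem _ hq)

-- bridge: under unique keys, a pair-hit exists iff an entry-hit exists
theorem hit_bridge (a b : List String) (interactions : List (String × List String))
    (hk : (interactions.map Prod.fst).Nodup) :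
    (∃ p1 ∈ a, ∃ p2 ∈ b, HitA interactions p1 p2) ↔ (∃ p ∈ interactions, HitP a b p) := by
  constructor
  · rintro ⟨p1, hp1, p2, hp2, (⟨ns, hl, hm⟩ | ⟨ns, hl, hm⟩)⟩
    · exact ⟨(p2, ns), lookup_some_mem hl, Or.inr ⟨hp2, p1, hm, hp1⟩⟩
    · exact ⟨(p1, ns), lookup_some_mem hl, Or.inl ⟨hp1, p2, hm, hp2⟩⟩
  · rintro ⟨⟨key, ns⟩, hmem, (⟨ha, x, hx, hxb⟩ | ⟨hb, x, hx, hxa⟩)⟩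
    · exact ⟨key, ha, x, hxb, Or.inr ⟨ns, mem_lookup_of_nodup hk hmem, hx⟩⟩
    · exact ⟨x, hxa, key, hb, Or.inl ⟨ns, mem_lookup_of_nodup hk hmem, hx⟩⟩

-- ===== VERDICT (by name: the statement is the Claim_ definition above) =====
theorem is_fp_spec : Claim_equal_is_fp := by
  intro a b interactions _ hpre
  unfold Spec_is_fp is_fp is_fp_alt
  have key : (isFpOuterA b interactions a = true) ↔ (isFpScanB (PySem.Set.ofList a) (PySem.Set.ofList b) interactions = true) := by
    rw [outerA_true_iff, scanB_true_iff]
    constructor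
    · intro h q hq hHit
      rcases (hit_bridge a b interactions hpre).mpr ⟨q, hq, hHit⟩ with ⟨p1, hp1, p2, hp2, hhit⟩
      exact h p1 hp1 p2 hp2 hhit
    · intro h p1 hp1 p2 hp2 hhit
      rcases (hit_bridge a b interactions hpre).mp ⟨p1, hp1, p2, hp2, hhit⟩ with ⟨q, hq, hHit⟩
      exact h q hq hHit
  cases h1 : isFpOuterA b interactions a <;> cases h2 : isFpScanB (PySem.Set.ofList a) (PySem.Set.ofList b) interactions <;> simp_all
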